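-- pv_equiv track=rewrite | github.com/aausachova/-5.0- | 3H.py | compare_matches
-- ===== SOURCE A (Python) =====
-- from collections import defaultdict
--
-- def compare_matches(matches_A, matches_B):
--     offset = defaultdict(int)
--     for i in range(len(matches_A)):
--         for j in range(len(matches_B)):
--             dx = matches_B[j][0][0] - matches_A[i][0][0]
--             dy = matches_B[j][0][1] - matches_A[i][0][1]
--             left = (dx, dy)
--             dx2 = matches_B[j][1][0] - matches_A[i][1][0]
--             dy2 = matches_B[j][1][1] - matches_A[i][1][1]
--             right = (dx2, dy2)
--             result = (left, right)
--             if (dx, dy) != (dx2, dy2):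
--                 continue
--             offset[result] += 1
--     return offset
-- ===== SOURCE B (Python) =====
-- from collections import defaultdict
--
-- def compare_matches(matches_A, matches_B):
--     # Bucket matches_B by internal displacement (p1 - p2); a pair (a, b) matches
--     # exactly when both points shift by the same offset, i.e. the internal
--     # displacements agree, so only matching buckets are enumerated.
--     buckets = defaultdict(list)
--     for b in matches_B:
--         buckets[(b[0][0] - b[1][0], b[0][1] - b[1][1])].append(b)
--     offset = defaultdict(int)
--     for a in matches_A:
--         for b in buckets.get((a[0][0] - a[1][0], a[0][1] - a[1][1]), []):
--             d = (b[0][0] - a[0][0], b[0][1] - a[0][1])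
--             offset[(d, d)] += 1
--     return offset
-- ===== Notes on version B (the rewrite author's own statement) =====
-- stated objective: faster
-- what changed: Instead of testing all N*M pairs, B buckets matches_B once by internal displacement (p1-p2) and, for each element of matches_A, enumerates only the bucket with the same displacement key, visiting exactly the matching pairs in the same (i,j) order.
import Mathlib
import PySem

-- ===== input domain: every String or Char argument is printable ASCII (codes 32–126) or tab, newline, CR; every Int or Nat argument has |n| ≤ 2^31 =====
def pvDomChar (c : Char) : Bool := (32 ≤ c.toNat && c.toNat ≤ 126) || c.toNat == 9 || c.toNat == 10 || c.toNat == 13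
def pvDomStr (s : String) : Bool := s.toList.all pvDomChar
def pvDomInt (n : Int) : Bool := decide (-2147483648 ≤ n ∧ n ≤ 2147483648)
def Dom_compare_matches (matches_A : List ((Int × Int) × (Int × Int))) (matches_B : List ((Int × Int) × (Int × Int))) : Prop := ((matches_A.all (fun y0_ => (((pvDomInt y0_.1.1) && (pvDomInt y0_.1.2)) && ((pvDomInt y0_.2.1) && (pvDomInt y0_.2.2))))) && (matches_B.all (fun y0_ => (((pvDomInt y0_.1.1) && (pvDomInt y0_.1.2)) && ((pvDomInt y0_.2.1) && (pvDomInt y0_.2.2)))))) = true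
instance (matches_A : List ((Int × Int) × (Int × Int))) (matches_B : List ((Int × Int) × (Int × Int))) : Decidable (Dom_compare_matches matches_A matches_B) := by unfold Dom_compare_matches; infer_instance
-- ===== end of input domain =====

-- B buckets matches_B once by internal displacement (p1-p2) so only matching pairs
-- are enumerated (objective: faster, O(N+M+matched pairs) instead of O(N*M)).
-- Both programs return a dict; rendered here as its items list, flattened per the type convention.

-- ===== PORT A =====
def compare_matches (matches_A : List ((Int × Int) × (Int × Int))) (matches_B : List ((Int × Int) × (Int × Int))) : List ((Int × Int) × (Int × Int) × Int) :=
  let offset : PySem.Dict ((Int × Int) × (Int × Int)) Int :=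
    (PySem.List.pyRange 0 (matches_A.length : Int) 1).foldl (fun offset i =>
      (PySem.List.pyRange 0 (matches_B.length : Int) 1).foldl (fun offset j =>
        let a := PySem.List.pyGetD matches_A i (((0 : Int), (0 : Int)), ((0 : Int), (0 : Int)))
        let b := PySem.List.pyGetD matches_B j (((0 : Int), (0 : Int)), ((0 : Int), (0 : Int)))
        let dx := b.1.1 - a.1.1
        let dy := b.1.2 - a.1.2
        let left := (dx, dy)
        let dx2 := b.2.1 - a.2.1
        let dy2 := b.2.2 - a.2.2
        let right := (dx2, dy2)
        let result := (left, right)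
        if (dx, dy) ≠ (dx2, dy2) then offset
        else offset.modify result 0 (· + 1)) offset) PySem.Dict.empty
  offset.items.map (fun p => (p.1.1, p.1.2, p.2))

-- ===== PORT B =====
def compare_matches_alt (matches_A : List ((Int × Int) × (Int × Int))) (matches_B : List ((Int × Int) × (Int × Int))) : List ((Int × Int) × (Int × Int) × Int) :=
  let buckets : PySem.Dict (Int × Int) (List ((Int × Int) × (Int × Int))) :=
    matches_B.foldl (fun d b => d.modify (b.1.1 - b.2.1, b.1.2 - b.2.2) [] (· ++ [b])) PySem.Dict.empty
  let offset : PySem.Dict ((Int × Int) × (Int × Int)) Int :=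
    matches_A.foldl (fun offset a =>
      (buckets.getD (a.1.1 - a.2.1, a.1.2 - a.2.2) []).foldl (fun offset b =>
        let d := (b.1.1 - a.1.1, b.1.2 - a.1.2)
        offset.modify (d, d) 0 (· + 1)) offset) PySem.Dict.empty
  offset.items.map (fun p => (p.1.1, p.1.2, p.2))

-- ===== PRECONDITION & SPEC =====
def Spec_compare_matches (matches_A : List ((Int × Int) × (Int × Int))) (matches_B : List ((Int × Int) × (Int × Int))) (out : List ((Int × Int) × (Int × Int) × Int)) : Prop := out = compare_matches_alt matches_A matches_B
instance (matches_A : List ((Int × Int) × (Int × Int))) (matches_B : List ((Int × Int) × (Int × Int))) (out : List ((Int × Int) × (Int × Int) × Int)) : Decidable (Spec_compare_matches matches_A matches_B out) := by unfold Spec_compare_matches; infer_instance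

-- ===== CLAIM (what is proved, stated in full; the proofs are below) =====
def Claim_equal_compare_matches : Prop := ∀ (matches_A : List ((Int × Int) × (Int × Int))) (matches_B : List ((Int × Int) × (Int × Int))), Dom_compare_matches matches_A matches_B → Spec_compare_matches matches_A matches_B (compare_matches matches_A matches_B)

-- ===== LEMMAS AND PROOFS =====

-- the body of A's inner loop for a fixed pair a and a candidate b (used only by the proofs)
def pvStep (a b : (Int × Int) × (Int × Int)) (off : PySem.Dict ((Int × Int) × (Int × Int)) Int) : PySem.Dict ((Int × Int) × (Int × Int)) Int :=
  if (b.1.1 - a.1.1, b.1.2 - a.1.2) ≠ (b.2.1 - a.2.1, b.2.2 - a.2.2) then off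
  else off.modify ((b.1.1 - a.1.1, b.1.2 - a.1.2), (b.2.1 - a.2.1, b.2.2 - a.2.2)) 0 (· + 1)

-- the bucket for key k holds exactly the elements of mB whose internal displacement is k, in order
theorem pv_bucket_getD (mB : List ((Int × Int) × (Int × Int))) (k : Int × Int) :
    (mB.foldl (fun d b => d.modify (b.1.1 - b.2.1, b.1.2 - b.2.2) [] (· ++ [b])) PySem.Dict.empty).getD k []
      = mB.filter (fun b => (b.1.1 - b.2.1, b.1.2 - b.2.2) == k) := by
  have h := PySem.Dict.getD_foldl_modify_append
      (l := mB.map (fun b => ((b.1.1 - b.2.1, b.1.2 - b.2.2), b)))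
      (d := (PySem.Dict.empty : PySem.Dict (Int × Int) (List ((Int × Int) × (Int × Int))))) (c := k)
  simp only [List.foldl_map] at h
  rw [h]
  simp [List.filter_map, List.map_map, Function.comp_def]

-- B's fold over the filtered list equals A's inner loop over all of mB with the skip test
theorem pv_inner (mB : List ((Int × Int) × (Int × Int))) (a : (Int × Int) × (Int × Int))
    (off : PySem.Dict ((Int × Int) × (Int × Int)) Int) :
    (mB.filter (fun b => (b.1.1 - b.2.1, b.1.2 - b.2.2) == (a.1.1 - a.2.1, a.1.2 - a.2.2))).foldl
        (fun offset b => offset.modify ((b.1.1 - a.1.1, b.1.2 - a.1.2), (b.1.1 - a.1.1, b.1.2 - a.1.2)) 0 (· + 1)) off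
      = mB.foldl (fun offset b => pvStep a b offset) off := by
  induction mB generalizing off with
  | nil => rfl
  | cons b t ih =>
    by_cases h : ((b.1.1 - b.2.1, b.1.2 - b.2.2) = (a.1.1 - a.2.1, a.1.2 - a.2.2))
    · have h' := h; rw [Prod.mk.injEq] at h'
      have heq : (b.1.1 - a.1.1, b.1.2 - a.1.2) = (b.2.1 - a.2.1, b.2.2 - a.2.2) := by
        rw [Prod.mk.injEq]; omega
      simp only [List.filter_cons, beq_iff_eq, h, if_true, List.foldl_cons]
      rw [ih]
      congr 1
      simp only [pvStep, heq, ne_eq, not_true_eq_false, if_false]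
    · have h' := h; rw [Prod.mk.injEq, not_and_or] at h'
      have hne : (b.1.1 - a.1.1, b.1.2 - a.1.2) ≠ (b.2.1 - a.2.1, b.2.2 - a.2.2) := by
        rw [Ne, Prod.mk.injEq, not_and_or]
        rcases h' with h' | h'
        · exact Or.inl (by omega)
        · exact Or.inr (by omega)
      simp only [List.filter_cons, beq_iff_eq, h, if_false, List.foldl_cons]
      rw [show pvStep a b off = off from by rw [pvStep, if_pos hne]]
      exact ih off

theorem pv_main (mA mB : List ((Int × Int) × (Int × Int))) :
    compare_matches mA mB = compare_matches_alt mA mB := by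
  unfold compare_matches compare_matches_alt
  refine congrArg (fun d : PySem.Dict ((Int × Int) × (Int × Int)) Int => d.items.map (fun p => (p.1.1, p.1.2, p.2))) ?_
  calc
    List.foldl
        (fun offset i =>
          List.foldl
            (fun offset j =>
              let a := PySem.List.pyGetD mA i (((0 : Int), (0 : Int)), ((0 : Int), (0 : Int)))
              let b := PySem.List.pyGetD mB j (((0 : Int), (0 : Int)), ((0 : Int), (0 : Int)))
              pvStep a b offset)
            offset (PySem.List.pyRange 0 (mB.length : Int) 1))
        PySem.Dict.empty (PySem.List.pyRange 0 (mA.length : Int) 1)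
      = List.foldl
          (fun offset i =>
            List.foldl (fun offset b => pvStep (PySem.List.pyGetD mA i (((0 : Int), (0 : Int)), ((0 : Int), (0 : Int)))) b offset)
              offset mB)
          PySem.Dict.empty (PySem.List.pyRange 0 (mA.length : Int) 1) := by
        refine congrArg (fun f => List.foldl f PySem.Dict.empty (PySem.List.pyRange 0 (mA.length : Int) 1))
          (funext fun offset => funext fun i => ?_)
        exact PySem.List.foldl_pyRange_zero_pyGetD' mB (((0 : Int), (0 : Int)), ((0 : Int), (0 : Int)))
          (fun offset b => pvStep (PySem.List.pyGetD mA i (((0 : Int), (0 : Int)), ((0 : Int), (0 : Int)))) b offset) offset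
    _ = List.foldl (fun offset a => List.foldl (fun offset b => pvStep a b offset) offset mB)
          PySem.Dict.empty mA :=
        PySem.List.foldl_pyRange_zero_pyGetD' mA (((0 : Int), (0 : Int)), ((0 : Int), (0 : Int)))
          (fun offset a => List.foldl (fun offset b => pvStep a b offset) offset mB) PySem.Dict.empty
    _ = List.foldl
          (fun offset a =>
            List.foldl (fun offset b =>
                offset.modify ((b.1.1 - a.1.1, b.1.2 - a.1.2), (b.1.1 - a.1.1, b.1.2 - a.1.2)) 0 (· + 1))
              offset
              ((mB.foldl (fun d b => d.modify (b.1.1 - b.2.1, b.1.2 - b.2.2) [] (· ++ [b])) PySem.Dict.empty).getD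
                (a.1.1 - a.2.1, a.1.2 - a.2.2) []))
          PySem.Dict.empty mA := by
        refine congrArg (fun f => List.foldl f PySem.Dict.empty mA)
          (funext fun offset => funext fun a => ?_)
        rw [pv_bucket_getD, pv_inner]

-- ===== VERDICT (by name: the statement is the Claim_ definition above) =====
theorem compare_matches_spec : Claim_equal_compare_matches := by
  intro mA mB _
  unfold Spec_compare_matches
  exact pv_main mA mB
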